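-- pv_equiv track=rewrite | github.com/ARAN1218/Algorithms | Sort/stalin_sort.py | stalin_sort
-- ===== SOURCE A (Python) =====
-- def stalin_sort(data):
--   """
--   スターリンソート (O(n))
--   現在見つかっている最大値より大きなデータを粛正する。
--
--   Args:
--     data (list): ソートする配列
--
--   Returns:
--     data_sorted (list): ソートされた配列
--   """
--   if not data:
--     return []
--
--   # 現在見つかっている最大値より大きなデータを粛正する
--   data_sorted = [data[0]]
--   for item in data[1:]:
--     if item >= data_sorted[-1]:
--       data_sorted.append(item)
--   return data_sorted
-- ===== SOURCE B (Python) =====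
-- def stalin_sort(data):
--     if not data:
--         return []
--     # prefix-maxima table: maxes[i] == max(data[0..i])
--     maxes = []
--     m = data[0]
--     for x in data:
--         m = m if m >= x else x
--         maxes.append(m)
--     # keep data[0], then every later element at least the max of everything before it
--     return [data[0]] + [x for x, pm in zip(data[1:], maxes) if x >= pm]
-- ===== Notes on version B (the rewrite author's own statement) =====
-- stated objective: alternative
-- what changed: Replaces A's single accumulating loop (append when item >= last kept) by a two-pass decomposition: first build the prefix-maxima table, then filter the tail by comparing each element against the max of its strict prefix.
import Mathlib
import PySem

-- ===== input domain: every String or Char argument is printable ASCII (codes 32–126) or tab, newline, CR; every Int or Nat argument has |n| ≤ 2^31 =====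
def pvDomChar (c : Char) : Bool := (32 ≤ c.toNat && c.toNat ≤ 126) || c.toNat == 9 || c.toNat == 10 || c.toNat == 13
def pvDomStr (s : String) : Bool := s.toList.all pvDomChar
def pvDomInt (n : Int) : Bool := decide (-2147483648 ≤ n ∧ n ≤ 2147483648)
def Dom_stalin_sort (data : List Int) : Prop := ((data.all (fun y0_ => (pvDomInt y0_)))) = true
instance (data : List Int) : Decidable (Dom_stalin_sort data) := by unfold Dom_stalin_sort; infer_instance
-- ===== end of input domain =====

-- B replaces A's single accumulating loop by a prefix-maxima table plus a separate filter pass (alternative decomposition, same cost).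

-- ===== PORT A =====
-- loop 'for item in data[1:]': acc is always nonempty (starts as [data[0]]), so getLastD 0 is exactly data_sorted[-1]
def stalinGoA (acc : List Int) : List Int → List Int
  | [] => acc
  | item :: rest =>
    if item ≥ acc.getLastD 0 then stalinGoA (acc ++ [item]) rest
    else stalinGoA acc rest

def stalin_sort (data : List Int) : List Int :=
  match data with
  | [] => []
  | d0 :: rest => stalinGoA [d0] rest

-- ===== PORT B =====
-- the 'for x in data' loop building maxes: running m, appending the updated m for each x
def bMaxes (m : Int) : List Int → List Int
  | [] => []
  | x :: xs =>
    let m' := if m ≥ x then m else x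
    m' :: bMaxes m' xs

def stalin_sort_alt (data : List Int) : List Int :=
  match data with
  | [] => []
  | d0 :: rest =>
    let maxes := bMaxes d0 (d0 :: rest)
    d0 :: (((rest.zip maxes).filter (fun p => p.1 ≥ p.2)).map Prod.fst)

-- ===== PRECONDITION & SPEC =====
def Spec_stalin_sort (data : List Int) (out : List Int) : Prop := out = stalin_sort_alt data
instance (data : List Int) (out : List Int) : Decidable (Spec_stalin_sort data out) := by unfold Spec_stalin_sort; infer_instance

-- ===== CLAIM (what is proved, stated in full; the proofs are below) =====
def Claim_equal_stalin_sort : Prop := ∀ (data : List Int), Dom_stalin_sort data → Spec_stalin_sort data (stalin_sort data)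

-- ===== LEMMAS AND PROOFS =====

-- shared reference: keep y when y ≥ running max m, then update m to max m y
def filt (m : Int) : List Int → List Int
  | [] => []
  | y :: ys => if y ≥ m then y :: filt (if m ≥ y then m else y) ys
               else filt (if m ≥ y then m else y) ys

theorem stalinGoA_cons (acc : List Int) (y : Int) (ys : List Int) :
    stalinGoA acc (y :: ys) =
      if y ≥ acc.getLastD 0 then stalinGoA (acc ++ [y]) ys else stalinGoA acc ys := rfl

theorem filt_cons (m y : Int) (ys : List Int) :
    filt m (y :: ys) =
      if y ≥ m then y :: filt (if m ≥ y then m else y) ys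
      else filt (if m ≥ y then m else y) ys := rfl

theorem stalinGoA_eq (rest : List Int) : ∀ (acc : List Int), acc ≠ [] →
    stalinGoA acc rest = acc ++ filt (acc.getLastD 0) rest := by
  induction rest with
  | nil => intro acc h; simp [stalinGoA, filt]
  | cons y ys ih =>
    intro acc h
    rw [stalinGoA_cons, filt_cons]
    by_cases hy : y ≥ acc.getLastD 0
    · rw [if_pos hy, if_pos hy, ih (acc ++ [y]) (by simp)]
      have hlast : (acc ++ [y]).getLastD 0 = y := by simp
      have hmax : (if acc.getLastD 0 ≥ y then acc.getLastD 0 else y) = y := by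
        by_cases hc : acc.getLastD 0 ≥ y
        · rw [if_pos hc]; omega
        · rw [if_neg hc]
      rw [hlast, hmax, List.append_assoc]
      rfl
    · rw [if_neg hy, if_neg hy, ih acc h]
      have hmax : (if acc.getLastD 0 ≥ y then acc.getLastD 0 else y) = acc.getLastD 0 := by
        rw [if_pos (by omega)]
      rw [hmax]

theorem zipFilt_eq (ys : List Int) : ∀ (m : Int),
    ((ys.zip (m :: bMaxes m ys)).filter (fun p => p.1 ≥ p.2)).map Prod.fst = filt m ys := by
  induction ys with
  | nil => intro m; simp [filt]
  | cons y ys' ih =>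
    intro m
    have hb : bMaxes m (y :: ys') = (if m ≥ y then m else y) :: bMaxes (if m ≥ y then m else y) ys' := rfl
    rw [hb, List.zip_cons_cons, List.filter_cons, filt_cons]
    by_cases hy : y ≥ m
    · rw [if_pos (by simpa using hy), if_pos hy, List.map_cons, ih]
    · rw [if_neg (by simpa using hy), if_neg hy, ih]

-- ===== VERDICT (by name: the statement is the Claim_ definition above) =====
theorem stalin_sort_spec : Claim_equal_stalin_sort := by
  intro data _
  unfold Spec_stalin_sort
  match data with
  | [] => rfl
  | d0 :: rest =>
    show stalinGoA [d0] rest = stalin_sort_alt (d0 :: rest)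
    rw [stalinGoA_eq rest [d0] (by simp)]
    have hb : bMaxes d0 (d0 :: rest) = d0 :: bMaxes d0 rest := by simp [bMaxes]
    simp only [stalin_sort_alt, hb]
    rw [zipFilt_eq rest d0]
    simp
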